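-- pv_equiv track=rewrite | github.com/DexGroves/mxnet-mahjong | code/hand.py | remove_pair
-- ===== SOURCE A (Python) =====
-- def remove_pair(hand):
--     """Remove the first available pair from a hand."""
--     shand = sorted(hand)
--     last_tile = '-1'
--
--     for tile in shand:
--         if tile == last_tile:
--             shand.remove(tile)
--             shand.remove(tile)
--             return shand
--         else:
--             last_tile = tile
--
--     raise ValueError("No pair found!")
-- ===== SOURCE B (Python) =====
-- def remove_pair(hand):
--     """Remove the first available pair from a hand."""
--     shand = sorted(hand)
--     counts = {}
--     for t in hand:
--         counts[t] = counts.get(t, 0) + 1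
--     pairs = [t for t, c in counts.items() if c >= 2]
--     if not pairs:
--         raise ValueError("No pair found!")
--     p = min(pairs)
--     i = shand.index(p)
--     return shand[:i] + shand[i + 2:]
-- ===== Notes on version B (the rewrite author's own statement) =====
-- stated objective: alternative
-- what changed: A sorts and scans adjacent tiles mutating the list in place; B tallies tile counts in a dict, takes the minimum tile with count >= 2, and rebuilds the result by slicing the sorted hand around its first occurrence.
import Mathlib
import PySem

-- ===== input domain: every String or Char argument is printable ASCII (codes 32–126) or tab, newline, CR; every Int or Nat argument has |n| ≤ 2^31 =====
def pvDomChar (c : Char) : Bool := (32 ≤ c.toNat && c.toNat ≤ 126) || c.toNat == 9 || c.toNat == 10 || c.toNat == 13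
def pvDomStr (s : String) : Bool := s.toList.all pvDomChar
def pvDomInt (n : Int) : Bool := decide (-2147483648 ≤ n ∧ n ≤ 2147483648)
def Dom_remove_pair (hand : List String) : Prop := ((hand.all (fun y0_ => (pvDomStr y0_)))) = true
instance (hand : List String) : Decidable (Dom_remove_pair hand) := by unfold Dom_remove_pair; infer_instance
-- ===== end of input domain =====

-- B replaces A's mutate-while-scanning pass by a count/min/slice decomposition (tally duplicates in a dict,
-- pick the smallest paired tile, rebuild by slicing); alternative structure, same cost class.


-- ===== PORT A =====
-- (Python string '<' is '<' on s.toList — code-point lexicographic — hence the sort key below.)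
-- shand.remove(tile); shand.remove(tile); return shand
def eraseTwoA (shand : List String) (t : String) : List String :=
  match PySem.List.remove? shand t with
  | none => []          -- ValueError from list.remove (unreachable: the loop just saw t)
  | some s1 =>
    match PySem.List.remove? s1 t with
    | none => []        -- ValueError from list.remove (the '-1'-sentinel corner); excluded by Pre_
    | some s2 => s2

-- the for-loop over shand with the last_tile accumulator (the function returns at the first firing
-- tile, before the mutation of shand can affect the iteration)
def removePairLoop (shand : List String) (last : String) : List String → List String
  | [] => []            -- raise ValueError("No pair found!"); excluded by Pre_
  | t :: rest => if t == last then eraseTwoA shand t else removePairLoop shand t rest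

def remove_pair (hand : List String) : List String :=
  let shand := PySem.List.sorted hand (fun x => x.toList)
  removePairLoop shand "-1" shand

-- ===== PORT B =====
def remove_pair_alt (hand : List String) : List String :=
  let shand := PySem.List.sorted hand (fun x => x.toList)
  let counts := hand.foldl (fun d t => d.insert t (d.getD t 0 + 1)) (PySem.Dict.empty : PySem.Dict String Int)
  let pairs := (counts.items.filter (fun kv => decide (2 ≤ kv.2))).map (fun kv => kv.1)
  match PySem.List.min? pairs (fun x => x.toList) with
  | none => []          -- raise ValueError("No pair found!"); excluded by Pre_
  | some p =>
    match PySem.List.index? shand p with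
    | none => []        -- unreachable: p occurs in shand
    | some i =>
      PySem.List.slice shand none (some (i : Int)) ++ PySem.List.slice shand (some ((i : Int) + 2)) none

-- ===== PRECONDITION & SPEC =====
-- Pre_ excludes exactly the inputs on which A raises (and returns nothing): hands with no repeated tile
-- (the explicit ValueError), and hands whose minimal tile is a lone '-1' (A's sentinel makes the second
-- list.remove raise ValueError).
def Pre_remove_pair (hand : List String) : Prop :=
  (∃ x ∈ hand, 2 ≤ hand.count x) ∧
  ¬(hand.count "-1" = 1 ∧ ∀ y ∈ hand, "-1".toList ≤ y.toList)
instance (hand : List String) : Decidable (Pre_remove_pair hand) := by unfold Pre_remove_pair; infer_instance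
def pvWitness_remove_pair : List String := (["1", "1"])

def Spec_remove_pair (hand : List String) (out : List String) : Prop := out = remove_pair_alt hand
instance (hand : List String) (out : List String) : Decidable (Spec_remove_pair hand out) := by unfold Spec_remove_pair; infer_instance

-- ===== CLAIM (what is proved, stated in full; the proofs are below) =====
def Claim_equal_remove_pair : Prop := ∀ (hand : List String), Dom_remove_pair hand → Pre_remove_pair hand → Spec_remove_pair hand (remove_pair hand)
-- ===== LEMMAS AND PROOFS =====

-- bridge: the DecidableLT instance the ports elaborate with equals the LinearOrder one the PySem order
-- lemmas are stated with (Decidable is a subsingleton)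
theorem decLT_listChar_eq :
    (fun (a b : List Char) => a.decidableLT b) = (LinearOrder.toDecidableLT : DecidableLT (List Char)) := by
  funext a b; exact Subsingleton.elim _ _

theorem sortedKey_pairwise (xs : List String) :
    List.Pairwise (fun a b : String => a.toList ≤ b.toList) (PySem.List.sorted xs (fun x => x.toList)) := by
  rw [decLT_listChar_eq]
  exact PySem.List.sorted_pairwise xs (fun x => x.toList)

theorem minKey_isMin {xs : List String} {m : String}
    (h : PySem.List.min? xs (fun x => x.toList) = some m) :
    ∀ y ∈ xs, m.toList ≤ y.toList := by
  rw [decLT_listChar_eq] at h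
  exact PySem.List.min?_isMin h

-- proof-side helper: the value at the first adjacent duplicate of a list
def firstDup : List String → Option String
  | x :: y :: r => if y == x then some x else firstDup (y :: r)
  | _ => none

theorem removePairLoop_eq_firstDup (s0 : List String) :
    ∀ (l : List String) (t : String),
      removePairLoop s0 t l = (firstDup (t :: l)).elim [] (eraseTwoA s0) := by
  intro l
  induction l with
  | nil => intro t; rfl
  | cons y r ih =>
    intro t
    show (if y == t then eraseTwoA s0 y else removePairLoop s0 y r) = _
    by_cases h : y = t
    · subst h; simp [firstDup]
    · simp only [firstDup, beq_iff_eq, h, if_false]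
      exact ih y

theorem firstDup_count : ∀ (s : List String) (v : String),
    firstDup s = some v → 2 ≤ s.count v
  | [], v, h => by simp [firstDup] at h
  | [x], v, h => by simp [firstDup] at h
  | x :: y :: r, v, h => by
    by_cases hyx : y = x
    · subst hyx
      simp [firstDup] at h
      rw [← h]
      have h1 : (y :: y :: r).count y = (y :: r).count y + 1 := List.count_cons_self
      have h2 : (y :: r).count y = r.count y + 1 := List.count_cons_self
      omega
    · simp only [firstDup, beq_iff_eq, if_neg hyx] at h
      have hrec := firstDup_count (y :: r) v h
      have hle : (y :: r).count v ≤ (x :: y :: r).count v := by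
        simp [List.count_cons]
      omega

theorem firstDup_min : ∀ (s : List String) (w : String),
    List.Pairwise (fun a b : String => a.toList ≤ b.toList) s → 2 ≤ s.count w →
    ∃ v, firstDup s = some v ∧ v.toList ≤ w.toList
  | [], w, _, hc => by simp at hc
  | [x], w, _, hc => by
    simp [List.count_cons] at hc
    split at hc <;> omega
  | x :: y :: r, w, hpw, hc => by
    by_cases hyx : y = x
    · refine ⟨x, by simp [firstDup, hyx], ?_⟩
      have hw : w ∈ x :: y :: r := by
        have : 0 < (x :: y :: r).count w := by omega
        exact List.count_pos_iff.mp this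
      rcases List.mem_cons.mp hw with h | h
      · subst h; exact le_refl _
      · exact (List.pairwise_cons.mp hpw).1 w h
    · have hwx : w ≠ x := by
        intro hwx; subst hwx
        have h1 : w ∈ y :: r := by
          have hcc : (w :: y :: r).count w = (y :: r).count w + 1 := List.count_cons_self
          have : 1 ≤ (y :: r).count w := by omega
          exact List.count_pos_iff.mp (by omega)
        have hxy : w.toList ≤ y.toList := (List.pairwise_cons.mp hpw).1 y (by simp)
        rcases List.mem_cons.mp h1 with h | h
        · exact hyx h.symm
        · have hyw : y.toList ≤ w.toList :=
            (List.pairwise_cons.mp (List.pairwise_cons.mp hpw).2).1 w h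
          exact hyx (String.toList_inj.mp (le_antisymm hyw hxy))
      have hc2 : 2 ≤ (y :: r).count w := by
        have : (x :: y :: r).count w = (y :: r).count w := by
          simp [List.count_cons, hwx.symm]
        omega
      obtain ⟨v, hv, hvw⟩ := firstDup_min (y :: r) w (List.pairwise_cons.mp hpw).2 hc2
      exact ⟨v, by simp only [firstDup, beq_iff_eq, if_neg hyx]; exact hv, hvw⟩

-- under Pre_, the sorted hand splits as pre ++ m :: m :: tl around the first occurrence of m
theorem sorted_decomp {s : List String} {m : String}
    (hpw : List.Pairwise (fun a b : String => a.toList ≤ b.toList) s)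
    (hm : m ∈ s) (hc : 2 ≤ s.count m) :
    ∃ pre tl, s = pre ++ m :: m :: tl ∧ m ∉ pre ∧ PySem.List.index? s m = some pre.length := by
  have hidx : (PySem.List.index? s m).isSome := (PySem.List.index?_isSome_iff s m).mpr hm
  obtain ⟨j, hj⟩ := Option.isSome_iff_exists.mp hidx
  obtain ⟨pre, suf, hsplit, hlen, hnotin⟩ := (PySem.List.index?_eq_some_iff s m j).mp hj
  have hcpre : pre.count m = 0 := List.count_eq_zero.mpr hnotin
  have hcsuf : 1 ≤ suf.count m := by
    rw [hsplit, List.count_append, List.count_cons_self] at hc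
    omega
  have hmsuf : m ∈ suf := List.count_pos_iff.mp (by omega)
  match suf, hmsuf with
  | u :: suf', hmsuf =>
    have hpw2 : List.Pairwise (fun a b : String => a.toList ≤ b.toList) (m :: u :: suf') := by
      rw [hsplit] at hpw
      exact (List.pairwise_append.mp hpw).2.1
    have hmu : m.toList ≤ u.toList := (List.pairwise_cons.mp hpw2).1 u (by simp)
    have hum : u = m := by
      rcases List.mem_cons.mp hmsuf with h | h
      · exact h.symm
      · have : u.toList ≤ m.toList :=
          (List.pairwise_cons.mp (List.pairwise_cons.mp hpw2).2).1 m h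
        exact String.toList_inj.mp (le_antisymm this hmu)
    subst hum
    exact ⟨pre, suf', by rw [hsplit], hnotin, by rw [hj, hlen]⟩

theorem eraseTwoA_decomp (pre tl : List String) (m : String) (hnotin : m ∉ pre) :
    eraseTwoA (pre ++ m :: m :: tl) m = pre ++ tl := by
  have h1 : m ∈ pre ++ m :: m :: tl := by simp
  rw [eraseTwoA, PySem.List.remove?_eq_some_erase _ m h1,
      List.erase_append_right _ hnotin, List.erase_cons_head]
  show (match PySem.List.remove? (pre ++ m :: tl) m with
    | none => []
    | some s2 => s2) = pre ++ tl
  have h2 : m ∈ pre ++ m :: tl := by simp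
  rw [PySem.List.remove?_eq_some_erase _ m h2, List.erase_append_right _ hnotin,
      List.erase_cons_head]

theorem remove_pair_spec : Claim_equal_remove_pair := by
  intro hand _ hpre
  obtain ⟨⟨x, hx, hxc⟩, hq⟩ := hpre
  set s := PySem.List.sorted hand (fun x => x.toList) with hs
  have hperm : s.Perm hand := PySem.List.sorted_perm hand (fun x => x.toList) false
  have hpw : List.Pairwise (fun a b : String => a.toList ≤ b.toList) s := sortedKey_pairwise hand
  -- the minimum paired tile m of B
  have hne : (PySem.Set.ofList hand).filter (fun k => decide ((2:Int) ≤ (hand.count k : Int))) ≠ [] := by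
    intro hnil
    have : x ∈ (PySem.Set.ofList hand).filter (fun k => decide ((2:Int) ≤ (hand.count k : Int))) := by
      rw [List.mem_filter]
      exact ⟨(PySem.Set.mem_ofList hand x).mpr hx, by simp; exact_mod_cast hxc⟩
    rw [hnil] at this; simp at this
  obtain ⟨m, hm⟩ : ∃ m, PySem.List.min? ((PySem.Set.ofList hand).filter
      (fun k => decide ((2:Int) ≤ (hand.count k : Int)))) (fun x => x.toList) = some m := by
    cases hmin : PySem.List.min? ((PySem.Set.ofList hand).filter
        (fun k => decide ((2:Int) ≤ (hand.count k : Int)))) (fun x => x.toList) with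
    | none => exact absurd ((PySem.List.min?_eq_none_iff _ _).mp hmin) hne
    | some m => exact ⟨m, rfl⟩
  have hmmem : m ∈ hand := by
    have := PySem.List.min?_mem hm
    rw [List.mem_filter] at this
    exact (PySem.Set.mem_ofList hand m).mp this.1
  have hmc : 2 ≤ hand.count m := by
    have := PySem.List.min?_mem hm
    rw [List.mem_filter] at this
    have h2 := of_decide_eq_true this.2
    exact_mod_cast h2
  have hmmin : ∀ y ∈ hand, 2 ≤ hand.count y → m.toList ≤ y.toList := by
    intro y hy hyc
    refine minKey_isMin hm y ?_
    rw [List.mem_filter]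
    exact ⟨(PySem.Set.mem_ofList hand y).mpr hy, by simp; exact_mod_cast hyc⟩
  -- decompose the sorted hand around m
  have hmems : m ∈ s := hperm.mem_iff.mpr hmmem
  have hcs : 2 ≤ s.count m := by rw [hperm.count_eq]; exact hmc
  obtain ⟨pre, tl, hdec, hnotin, hidx⟩ := sorted_decomp hpw hmems hcs
  -- B's value is pre ++ tl
  have hB : remove_pair_alt hand = pre ++ tl := by
    have hcnt : hand.foldl (fun d t => d.insert t (d.getD t 0 + 1)) (PySem.Dict.empty : PySem.Dict String Int)
        = PySem.Dict.counter hand := by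
      rw [PySem.Dict.counter_eq_foldl]; rfl
    have hpairs : (((PySem.Dict.counter hand).items.filter
          (fun kv => decide (2 ≤ kv.2))).map (fun kv => kv.1))
        = (PySem.Set.ofList hand).filter (fun k => decide ((2:Int) ≤ (hand.count k : Int))) := by
      rw [PySem.Dict.items_counter, List.filter_map, List.map_map]
      simp [Function.comp_def]
    simp only [remove_pair_alt]
    rw [← hs, hcnt, hpairs, hm]
    show (match PySem.List.index? s m with
      | none => []
      | some i =>
          PySem.List.slice s none (some (i : Int)) ++ PySem.List.slice s (some ((i : Int) + 2)) none)
        = pre ++ tl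
    rw [hidx]
    show PySem.List.slice s none (some ((pre.length : Nat) : Int)) ++
        PySem.List.slice s (some (((pre.length : Nat) : Int) + 2)) none = pre ++ tl
    rw [PySem.List.slice_to_natCast]
    have hcast : (((pre.length : Nat) : Int) + 2) = (((pre.length + 2 : Nat)) : Int) := by push_cast; ring
    rw [hcast, PySem.List.slice_from_natCast]
    have htake : s.take pre.length = pre := by
      rw [hdec]; exact List.take_left
    have hdrop : s.drop (pre.length + 2) = tl := by
      have hre : s = (pre ++ [m, m]) ++ tl := by rw [hdec]; simp
      rw [hre]
      have hl : (pre ++ [m, m]).length = pre.length + 2 := by simp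
      rw [← hl]; exact List.drop_left
    rw [htake, hdrop]
  -- A's loop fires on m
  have hA : remove_pair hand = eraseTwoA s m := by
    simp only [remove_pair]
    rw [← hs]
    have hsne : s ≠ [] := by
      intro h0; rw [h0] at hmems; simp at hmems
    obtain ⟨t, l, hsn⟩ : ∃ t l, s = t :: l := by
      cases hc : s with
      | nil => exact absurd hc hsne
      | cons t l => exact ⟨t, l, rfl⟩
    rw [hsn]
    have hpwtl : List.Pairwise (fun a b : String => a.toList ≤ b.toList) (t :: l) := by
      rw [← hsn]; exact hpw
    have hheadmin : ∀ y ∈ t :: l, t.toList ≤ y.toList := by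
      intro y hy
      rcases List.mem_cons.mp hy with h | h
      · subst h; exact le_refl _
      · exact (List.pairwise_cons.mp hpwtl).1 y h
    have hpermtl : (t :: l).Perm hand := by rw [← hsn]; exact hperm
    by_cases ht : t = "-1"
    · -- the sentinel fires at the head; Pre_ forces count('-1') ≥ 2, so m = '-1' = t
      have hmem1 : "-1" ∈ hand := hpermtl.subset (by rw [← ht]; exact List.mem_cons_self)
      have hminh : ∀ y ∈ hand, "-1".toList ≤ y.toList := by
        intro y hy
        have := hheadmin y (hpermtl.mem_iff.mpr hy)
        rw [ht] at this; exact this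
      have hc1 : hand.count "-1" ≠ 1 := fun h1 => hq ⟨h1, hminh⟩
      have hcpos : 0 < hand.count "-1" := List.count_pos_iff.mpr hmem1
      have hc2 : 2 ≤ hand.count "-1" := by omega
      have hmeq : m = "-1" := by
        have h1 : m.toList ≤ "-1".toList := hmmin "-1" hmem1 hc2
        have h2 : "-1".toList ≤ m.toList := by
          have := hheadmin m (hpermtl.mem_iff.mpr hmmem); rw [ht] at this; exact this
        exact String.toList_inj.mp (le_antisymm h1 h2)
      show (if t == "-1" then eraseTwoA (t :: l) t else removePairLoop (t :: l) t l) = _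
      rw [if_pos (beq_iff_eq.mpr ht), ht, hmeq]
    · show (if t == "-1" then eraseTwoA (t :: l) t else removePairLoop (t :: l) t l) = _
      rw [if_neg (by simpa using ht), removePairLoop_eq_firstDup]
      have hcs' : 2 ≤ (t :: l).count m := by rw [← hsn]; exact hcs
      obtain ⟨v, hv, hvm⟩ := firstDup_min (t :: l) m hpwtl hcs'
      have hvc : 2 ≤ (t :: l).count v := firstDup_count (t :: l) v hv
      have hvhand : v ∈ hand := hpermtl.subset (List.count_pos_iff.mp (by omega))
      have hvchand : 2 ≤ hand.count v := by rw [← hpermtl.count_eq]; exact hvc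
      have hmv : m.toList ≤ v.toList := hmmin v hvhand hvchand
      have hveq : v = m := String.toList_inj.mp (le_antisymm hvm hmv)
      rw [hv, hveq]; rfl
  show Spec_remove_pair hand (remove_pair hand)
  unfold Spec_remove_pair
  rw [hA, hB, hdec]
  exact eraseTwoA_decomp pre tl m hnotin
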